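-- pv_equiv track=rewrite | github.com/zoeimogen/AoC2018 | aoc2018/day08.py | runsolution
-- ===== SOURCE A (Python) =====
-- from typing import Tuple, List
--
-- def runsolution(inputs: List[int], ptr: int = 0) -> Tuple[int, int, int]:
--     '''Solve both parts'''
--     metadatatotal = 0
--
--     # Read node header
--     childcount = inputs[ptr]
--     metadatacount = inputs[ptr+1]
--     ptr += 2
--
--     # Loop through all the children of this node
--     childvalues = []
--
--     while childcount:
--         childcount -= 1
--         (x, y, ptr) = runsolution(inputs, ptr)
--         metadatatotal += x
--         childvalues.append(y)
--
--     # Metadata value is just the sum of all the metadata values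
--     metadatatotal += sum(inputs[ptr:ptr+metadatacount])
--
--     # If we have child nodes, calculate the node value from that.
--     if childvalues:
--         value = 0
--         while metadatacount:
--             try:
--                 value += childvalues[inputs[ptr]-1]
--             # Ignore metadata that points at non-existent child nodes.
--             except IndexError:
--                 pass
--             ptr += 1
--             metadatacount -= 1
--     # But if we don't have child notes, node value is the same as metadata value
--     else:
--         value = metadatatotal
--         ptr += metadatacount
--
--     return (metadatatotal, value, ptr)
-- ===== SOURCE B (Python) =====
-- from typing import Tuple, List
--
-- def runsolution(inputs: List[int], ptr: int = 0) -> Tuple[int, int, int]: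
--     '''Solve both parts: iterative parser with an explicit stack of frames'''
--     stack = []
--     # frame = [remaining child count, metadata count, metadata total so far, child values]
--     frame = [inputs[ptr], inputs[ptr + 1], 0, []]
--     ptr += 2
--     while True:
--         if frame[0]:
--             # Still expecting children: read the next child's header and descend.
--             frame[0] -= 1
--             stack.append(frame)
--             frame = [inputs[ptr], inputs[ptr + 1], 0, []]
--             ptr += 2
--         else:
--             # All children done: read this node's metadata and compute its value.
--             m, mt, cvs = frame[1], frame[2], frame[3]
--             mt += sum(inputs[ptr:ptr + m])
--             if cvs:
--                 value = 0
--                 while m: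
--                     try:
--                         value += cvs[inputs[ptr] - 1]
--                     # Ignore metadata that points at non-existent child nodes.
--                     except IndexError:
--                         pass
--                     ptr += 1
--                     m -= 1
--             else:
--                 value = mt
--                 ptr += m
--             if not stack:
--                 return (mt, value, ptr)
--             frame = stack.pop()
--             frame[2] += mt
--             frame[3].append(value)
-- ===== Notes on version B (the rewrite author's own statement) =====
-- stated objective: alternative
-- what changed: A's recursive-descent parser is replaced by an iterative parser that advances one pointer and keeps an explicit stack of frames (remaining child count, metadata count, metadata total, child values), popping a frame into its parent when its children are done.
-- outside the precondition, e.g. on runsolution([9, 0, 0, -2], 0): A returns (0, 0, 2), B returns (0, 0, 2)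
import Mathlib
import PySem

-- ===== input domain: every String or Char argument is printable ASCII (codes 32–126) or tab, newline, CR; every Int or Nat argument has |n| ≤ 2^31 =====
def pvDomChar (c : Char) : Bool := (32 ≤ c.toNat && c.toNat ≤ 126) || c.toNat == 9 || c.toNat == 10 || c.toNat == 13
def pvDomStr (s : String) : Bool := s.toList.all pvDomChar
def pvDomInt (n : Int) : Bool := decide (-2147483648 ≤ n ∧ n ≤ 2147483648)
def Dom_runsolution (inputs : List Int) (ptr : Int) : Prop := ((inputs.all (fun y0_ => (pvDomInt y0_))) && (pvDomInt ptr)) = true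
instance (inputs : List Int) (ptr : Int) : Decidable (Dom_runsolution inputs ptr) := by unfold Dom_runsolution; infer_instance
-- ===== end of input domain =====

-- B replaces A's recursion by an iterative parser over an explicit stack of frames (alternative
-- decomposition, same cost); both Pythons agree wherever A returns, the proof covers Pre_.

-- ===== PORT A =====
-- A's inner `while metadatacount:` value loop (fuel models the loop counter; fuel m.toNat is
-- exactly the number of iterations when m ≥ 0, and none models the divergence when m < 0).
def aVal (inputs cvs : List Int) : Nat → Int → Int → Int → Option (Int × Int)
  | fuel, m, ptr, value =>
    if m = 0 then some (value, ptr)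
    else match fuel with
      | 0 => none
      | f+1 => aVal inputs cvs f (m - 1) (ptr + 1)
          (value + ((PySem.List.pyGet? inputs ptr).bind
                      (fun ix => PySem.List.pyGet? cvs (ix - 1))).getD 0)

-- the tail of A's body after the children loop: metadata sum, node value, final ptr
def aFinish (inputs : List Int) (m mt : Int) (cvs : List Int) (ptr : Int) : Option (Int × Int × Int) :=
  let mt2 := mt + (PySem.List.slice inputs (some ptr) (some (ptr + m))).sum
  if cvs = [] then some (mt2, mt2, ptr + m)
  else match aVal inputs cvs m.toNat m ptr 0 with
    | none => none
    | some (v, p) => some (mt2, v, p)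

mutual
-- A's recursive function (fuel bounds the recursion; none models raise/divergence)
def aNode (inputs : List Int) (fuel : Nat) (ptr : Int) : Option (Int × Int × Int) :=
  match PySem.List.pyGet? inputs ptr, PySem.List.pyGet? inputs (ptr + 1) with
  | some c, some m =>
    match aChildren inputs fuel c (ptr + 2) 0 [] with
    | none => none
    | some (mt1, cvs1, p1) => aFinish inputs m mt1 cvs1 p1
  | _, _ => none
termination_by (fuel, 1)
-- A's `while childcount:` loop
def aChildren (inputs : List Int) (fuel : Nat) (c ptr mt : Int) (cvs : List Int) :
    Option (Int × List Int × Int) :=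
  if c = 0 then some (mt, cvs, ptr)
  else match fuel with
    | 0 => none
    | g+1 =>
      match aNode inputs g ptr with
      | none => none
      | some (x, y, p) => aChildren inputs g (c - 1) p (mt + x) (cvs ++ [y])
termination_by (fuel, 0)
end

def runsolution (inputs : List Int) (ptr : Int) : Int × Int × Int :=
  (aNode inputs (inputs.length + 1) ptr).getD (0, 0, 0)

-- ===== PORT B =====
-- B's value loop (same Python text as in A's finish step)
def bVal (inputs cvs : List Int) : Nat → Int → Int → Int → Option (Int × Int)
  | fuel, m, ptr, value =>
    if m = 0 then some (value, ptr)
    else match fuel with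
      | 0 => none
      | f+1 => bVal inputs cvs f (m - 1) (ptr + 1)
          (value + ((PySem.List.pyGet? inputs ptr).bind
                      (fun ix => PySem.List.pyGet? cvs (ix - 1))).getD 0)

-- B's `else` branch: complete the finished frame (metadata sum, value, final ptr)
def bFinish (inputs : List Int) (m mt : Int) (cvs : List Int) (ptr : Int) : Option (Int × Int × Int) :=
  let mt2 := mt + (PySem.List.slice inputs (some ptr) (some (ptr + m))).sum
  if cvs = [] then some (mt2, mt2, ptr + m)
  else match bVal inputs cvs m.toNat m ptr 0 with
    | none => none
    | some (v, p) => some (mt2, v, p)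

-- B's main `while True:` loop over (stack, current frame, ptr); a frame is
-- (remaining child count, metadata count, metadata total so far, child values).
-- fuel is consumed once per pushed child header (none models raise/divergence).
def bRun (inputs : List Int) (fuel : Nat) (stack : List (Int × Int × Int × List Int))
    (frame : Int × Int × Int × List Int) (ptr : Int) : Option (Int × Int × Int) :=
  if frame.1 ≠ 0 then
    match fuel with
    | 0 => none
    | g+1 =>
      match PySem.List.pyGet? inputs ptr, PySem.List.pyGet? inputs (ptr + 1) with
      | some c', some m' =>
        bRun inputs g ((frame.1 - 1, frame.2.1, frame.2.2.1, frame.2.2.2) :: stack)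
          (c', m', 0, []) (ptr + 2)
      | _, _ => none
  else
    match bFinish inputs frame.2.1 frame.2.2.1 frame.2.2.2 ptr with
    | none => none
    | some (MT, V, P) =>
      match stack with
      | [] => some (MT, V, P)
      | fr :: rest => bRun inputs fuel rest (fr.1, fr.2.1, fr.2.2.1 + MT, fr.2.2.2 ++ [V]) P
termination_by (fuel, stack.length)

def runsolution_alt (inputs : List Int) (ptr : Int) : Int × Int × Int :=
  match PySem.List.pyGet? inputs ptr, PySem.List.pyGet? inputs (ptr + 1) with
  | some c, some m => (bRun inputs (inputs.length + 1) [] (c, m, 0, []) (ptr + 2)).getD (0, 0, 0)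
  | _, _ => (0, 0, 0)

-- ===== PRECONDITION & SPEC =====
-- Grammar recognizer for Pre_: checks only that a node is readable at ptr — headers in range,
-- child count ≥ 0, metadata count ≥ 0 for nodes with children — and returns the node's end
-- pointer together with the number of child nodes entered below it; it computes none of the
-- program's outputs.  mode = true reads one node, mode = false reads `c` remaining children.
def shapeK (inputs : List Int) : Nat → Bool → Int → Int → Option (Int × Nat)
  | 0, _, _, _ => none
  | f+1, true, _, ptr =>
    match PySem.List.pyGet? inputs ptr, PySem.List.pyGet? inputs (ptr + 1) with
    | some c, some m =>
      if 0 ≤ c ∧ (c = 0 ∨ 0 ≤ m) then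
        match shapeK inputs f false c (ptr + 2) with
        | none => none
        | some (p1, k) => some (p1 + m, k)
      else none
    | _, _ => none
  | f+1, false, c, ptr =>
    if c = 0 then some (ptr, 0)
    else
      match shapeK inputs f true 0 ptr with
      | none => none
      | some (p, k1) =>
        match shapeK inputs f false (c - 1) p with
        | none => none
        | some (p1, k2) => some (p1, k1 + k2 + 1)

-- Pre_ excludes inputs on which A raises (IndexError/RecursionError) or loops forever (a negative
-- child count anywhere, a negative metadata count on a node with children), and — via its fuel and
-- node-count bounds — self-overlapping parses reachable only through a leaf whose negative
-- metadata count moves the pointer backwards, on which A can still return.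
def Pre_runsolution (inputs : List Int) (ptr : Int) : Prop :=
  (match shapeK inputs (2 * inputs.length + 2) true 0 ptr with
   | some (_, k) => decide (k ≤ inputs.length)
   | none => false) = true
instance (inputs : List Int) (ptr : Int) : Decidable (Pre_runsolution inputs ptr) := by
  unfold Pre_runsolution; infer_instance

def pvWitness_runsolution : List Int × Int := ([2, 3, 0, 3, 10, 11, 12, 1, 1, 0, 1, 99, 2, 1, 1, 2], 0)

def Spec_runsolution (inputs : List Int) (ptr : Int) (out : Int × Int × Int) : Prop := out = runsolution_alt inputs ptr
instance (inputs : List Int) (ptr : Int) (out : Int × Int × Int) : Decidable (Spec_runsolution inputs ptr out) := by unfold Spec_runsolution; infer_instance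

-- ===== CLAIM (what is proved, stated in full; the proofs are below) =====
def Claim_equal_runsolution : Prop := ∀ (inputs : List Int) (ptr : Int), Dom_runsolution inputs ptr → Pre_runsolution inputs ptr → Spec_runsolution inputs ptr (runsolution inputs ptr)

-- ===== LEMMAS AND PROOFS =====

theorem bVal_eq_aVal (inputs cvs : List Int) :
    ∀ fuel m ptr value, bVal inputs cvs fuel m ptr value = aVal inputs cvs fuel m ptr value := by
  intro fuel
  induction fuel with
  | zero => intro m ptr value; rw [bVal, aVal]
  | succ f ih => intro m ptr value; rw [bVal, aVal]; simp only [ih]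

theorem bFinish_eq_aFinish (inputs : List Int) (m mt : Int) (cvs : List Int) (ptr : Int) :
    bFinish inputs m mt cvs ptr = aFinish inputs m mt cvs ptr := by
  rw [bFinish, aFinish, bVal_eq_aVal]

-- instrumented A (proof device): same computation as aNode/aChildren but threading the
-- leftover fuel through, so that its fuel accounting matches bRun's push count exactly
mutual
def aNodeI (inputs : List Int) (fuel : Nat) (ptr : Int) : Option (Int × Int × Int × Nat) :=
  match PySem.List.pyGet? inputs ptr, PySem.List.pyGet? inputs (ptr + 1) with
  | some c, some m =>
    match aChildrenI inputs fuel c (ptr + 2) 0 [] with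
    | none => none
    | some (mt1, cvs1, p1, fl) =>
      match aFinish inputs m mt1 cvs1 p1 with
      | none => none
      | some r => some (r.1, r.2.1, r.2.2, fl)
  | _, _ => none
termination_by (fuel, 1)
def aChildrenI (inputs : List Int) (fuel : Nat) (c ptr mt : Int) (cvs : List Int) :
    Option (Int × List Int × Int × Nat) :=
  if c = 0 then some (mt, cvs, ptr, fuel)
  else match fuel with
    | 0 => none
    | g+1 =>
      match aNodeI inputs g ptr with
      | none => none
      | some (x, y, p, f1) => aChildrenI inputs (min f1 g) (c - 1) p (mt + x) (cvs ++ [y])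
termination_by (fuel, 0)
end

-- B's pop/return step, as a function of the finished frame's result
def bPop (inputs : List Int) (fuel : Nat) (stack : List (Int × Int × Int × List Int)) :
    Option (Int × Int × Int) → Option (Int × Int × Int)
  | none => none
  | some (MT, V, P) =>
    match stack with
    | [] => some (MT, V, P)
    | fr :: rest => bRun inputs fuel rest (fr.1, fr.2.1, fr.2.2.1 + MT, fr.2.2.2 ++ [V]) P

theorem leftover_le (inputs : List Int) : ∀ fuel : Nat,
    (∀ ptr r, aNodeI inputs fuel ptr = some r → r.2.2.2 ≤ fuel) ∧
    (∀ c ptr mt cvs s, aChildrenI inputs fuel c ptr mt cvs = some s → s.2.2.2 ≤ fuel) := by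
  intro fuel
  induction fuel using Nat.strong_induction_on with
  | _ fuel ih =>
    have hC : ∀ c ptr mt cvs s, aChildrenI inputs fuel c ptr mt cvs = some s → s.2.2.2 ≤ fuel := by
      intro c ptr mt cvs s h
      rw [aChildrenI.eq_def] at h
      by_cases hc : c = 0
      · simp only [if_pos hc] at h
        cases h
        exact le_refl _
      · simp only [if_neg hc] at h
        cases fuel with
        | zero => exact absurd h (by simp)
        | succ g =>
          cases hn : aNodeI inputs g ptr with
          | none => simp [hn] at h
          | some r =>
            obtain ⟨x, y, p, f1⟩ := r
            simp only [hn] at h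
            have h2 := (ih (min f1 g) (by omega)).2 _ _ _ _ _ h
            omega
    refine ⟨?_, hC⟩
    intro ptr r h
    rw [aNodeI.eq_def] at h
    cases hg1 : PySem.List.pyGet? inputs ptr with
    | none => simp [hg1] at h
    | some c =>
      cases hg2 : PySem.List.pyGet? inputs (ptr + 1) with
      | none => simp [hg1, hg2] at h
      | some m =>
        simp only [hg1, hg2] at h
        cases hch : aChildrenI inputs fuel c (ptr + 2) 0 [] with
        | none => simp [hch] at h
        | some s =>
          obtain ⟨mt1, cvs1, p1, fl⟩ := s
          simp only [hch] at h
          cases hf : aFinish inputs m mt1 cvs1 p1 with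
          | none => simp [hf] at h
          | some rr =>
            simp only [hf] at h
            cases h
            simpa using hC _ _ _ _ _ hch

theorem mono (inputs : List Int) : ∀ fuel : Nat,
    (∀ fuel' ptr r, fuel ≤ fuel' → aNode inputs fuel ptr = some r → aNode inputs fuel' ptr = some r) ∧
    (∀ fuel' c ptr mt cvs s, fuel ≤ fuel' → aChildren inputs fuel c ptr mt cvs = some s →
      aChildren inputs fuel' c ptr mt cvs = some s) := by
  intro fuel
  induction fuel using Nat.strong_induction_on with
  | _ fuel ih =>
    have hCm : ∀ fuel' c ptr mt cvs s, fuel ≤ fuel' → aChildren inputs fuel c ptr mt cvs = some s →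
        aChildren inputs fuel' c ptr mt cvs = some s := by
      intro fuel' c ptr mt cvs s hle h
      rw [aChildren.eq_def] at h
      rw [aChildren.eq_def]
      by_cases hc : c = 0
      · simp only [if_pos hc] at h ⊢
        exact h
      · simp only [if_neg hc] at h ⊢
        cases fuel with
        | zero => exact absurd h (by simp)
        | succ g =>
          cases fuel' with
          | zero => omega
          | succ g' =>
            cases hn : aNode inputs g ptr with
            | none => simp [hn] at h
            | some r0 =>
              obtain ⟨x, y, p⟩ := r0
              simp only [hn] at h
              have hn' : aNode inputs g' ptr = some (x, y, p) :=
                (ih g (by omega)).1 g' ptr _ (by omega) hn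
              simp only [hn']
              exact (ih g (by omega)).2 g' _ _ _ _ _ (by omega) h
    refine ⟨?_, hCm⟩
    intro fuel' ptr r hle h
    rw [aNode.eq_def] at h
    rw [aNode.eq_def]
    cases hg1 : PySem.List.pyGet? inputs ptr with
    | none => simp [hg1] at h
    | some c =>
      cases hg2 : PySem.List.pyGet? inputs (ptr + 1) with
      | none => simp [hg1, hg2] at h
      | some m =>
        simp only [hg1, hg2] at h ⊢
        cases hch : aChildren inputs fuel c (ptr + 2) 0 [] with
        | none => simp [hch] at h
        | some s =>
          obtain ⟨mt1, cvs1, p1⟩ := s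
          simp only [hch] at h
          have hch' := hCm fuel' _ _ _ _ _ hle hch
          simp only [hch']
          exact h

theorem inst_sound (inputs : List Int) : ∀ fuel : Nat,
    (∀ ptr x y p fl, aNodeI inputs fuel ptr = some (x, y, p, fl) →
      aNode inputs fuel ptr = some (x, y, p)) ∧
    (∀ c ptr mt cvs mt1 cvs1 p1 fl, aChildrenI inputs fuel c ptr mt cvs = some (mt1, cvs1, p1, fl) →
      aChildren inputs fuel c ptr mt cvs = some (mt1, cvs1, p1)) := by
  intro fuel
  induction fuel using Nat.strong_induction_on with
  | _ fuel ih =>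
    have hC : ∀ c ptr mt cvs mt1 cvs1 p1 fl,
        aChildrenI inputs fuel c ptr mt cvs = some (mt1, cvs1, p1, fl) →
        aChildren inputs fuel c ptr mt cvs = some (mt1, cvs1, p1) := by
      intro c ptr mt cvs mt1 cvs1 p1 fl h
      rw [aChildrenI.eq_def] at h
      rw [aChildren.eq_def]
      by_cases hc : c = 0
      · simp only [if_pos hc] at h ⊢
        cases h
        rfl
      · simp only [if_neg hc] at h ⊢
        cases fuel with
        | zero => exact absurd h (by simp)
        | succ g =>
          cases hn : aNodeI inputs g ptr with
          | none => simp [hn] at h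
          | some r0 =>
            obtain ⟨x, y, p, f1⟩ := r0
            simp only [hn] at h
            have hnp : aNode inputs g ptr = some (x, y, p) := (ih g (by omega)).1 _ _ _ _ _ hn
            simp only [hnp]
            have hrec := (ih (min f1 g) (by omega)).2 _ _ _ _ _ _ _ _ h
            exact (mono inputs (min f1 g)).2 g _ _ _ _ _ (by omega) hrec
    refine ⟨?_, hC⟩
    intro ptr x y p fl h
    rw [aNodeI.eq_def] at h
    rw [aNode.eq_def]
    cases hg1 : PySem.List.pyGet? inputs ptr with
    | none => simp [hg1] at h
    | some c =>
      cases hg2 : PySem.List.pyGet? inputs (ptr + 1) with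
      | none => simp [hg1, hg2] at h
      | some m =>
        simp only [hg1, hg2] at h ⊢
        cases hch : aChildrenI inputs fuel c (ptr + 2) 0 [] with
        | none => simp [hch] at h
        | some s =>
          obtain ⟨mt1, cvs1, p1, f2⟩ := s
          simp only [hch] at h
          have hch' := hC _ _ _ _ _ _ _ _ hch
          simp only [hch']
          cases hf : aFinish inputs m mt1 cvs1 p1 with
          | none => simp [hf] at h
          | some rr =>
            simp only [hf] at h
            cases h
            rfl

theorem aVal_sound (inputs cvs : List Int) :
    ∀ (n : Nat) (ptr value : Int), ∃ v, aVal inputs cvs n (n : Int) ptr value = some (v, ptr + n) := by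
  intro n
  induction n with
  | zero => intro ptr value; exact ⟨value, by rw [aVal]; simp⟩
  | succ f ih =>
    intro ptr value
    rw [aVal]
    have h1 : ((f : Int) + 1 = 0) = False := by simp; omega
    simp only [Nat.cast_add, Nat.cast_one, h1, if_false]
    have h2 : (f : Int) + 1 - 1 = (f : Int) := by ring
    rw [h2]
    obtain ⟨v, hv⟩ := ih (ptr + 1) (value + ((PySem.List.pyGet? inputs ptr).bind
                      (fun ix => PySem.List.pyGet? cvs (ix - 1))).getD 0)
    exact ⟨v, by rw [hv]; congr 2; ring⟩

theorem aFinish_sound (inputs : List Int) (m mt : Int) (cvs : List Int) (ptr : Int)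
    (h : cvs = [] ∨ 0 ≤ m) : ∃ X Y, aFinish inputs m mt cvs ptr = some (X, Y, ptr + m) := by
  rw [aFinish]
  by_cases hc : cvs = []
  · refine ⟨mt + (PySem.List.slice inputs (some ptr) (some (ptr + m))).sum,
      mt + (PySem.List.slice inputs (some ptr) (some (ptr + m))).sum, ?_⟩
    simp [hc]
  · rcases h with h | h
    · exact absurd h hc
    · have hm : m = ((m.toNat : Nat) : Int) := by omega
      obtain ⟨v, hv⟩ := aVal_sound inputs cvs m.toNat ptr 0
      refine ⟨mt + (PySem.List.slice inputs (some ptr) (some (ptr + m))).sum, v, ?_⟩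
      simp only [if_neg hc]
      rw [hm]
      simp only [Int.toNat_natCast]
      rw [hv]

theorem shapeK_sound (inputs : List Int) : ∀ fuel : Nat,
    (∀ ptr q k, shapeK inputs fuel true 0 ptr = some (q, k) →
      ∀ G : Nat, ∃ X Y, aNodeI inputs (k + G) ptr = some (X, Y, q, G)) ∧
    (∀ c ptr p1 k, shapeK inputs fuel false c ptr = some (p1, k) →
      ∀ (G : Nat) (mt : Int) (cvs : List Int),
        ∃ mt1 cvs1, aChildrenI inputs (k + G) c ptr mt cvs = some (mt1, cvs1, p1, G)) := by
  intro fuel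
  induction fuel with
  | zero => exact ⟨fun ptr q k h => absurd h (by simp [shapeK]),
      fun c ptr p1 k h => absurd h (by simp [shapeK])⟩
  | succ f ih =>
    constructor
    · intro ptr q k h G
      rw [shapeK] at h
      rw [aNodeI.eq_def]
      cases hg1 : PySem.List.pyGet? inputs ptr with
      | none => simp [hg1] at h
      | some c =>
        cases hg2 : PySem.List.pyGet? inputs (ptr + 1) with
        | none => simp [hg1, hg2] at h
        | some m =>
          simp only [hg1, hg2] at h ⊢
          by_cases hcm : 0 ≤ c ∧ (c = 0 ∨ 0 ≤ m)
          · simp only [if_pos hcm] at h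
            cases hsc : shapeK inputs f false c (ptr + 2) with
            | none => simp [hsc] at h
            | some r0 =>
              obtain ⟨p1, k1⟩ := r0
              simp only [hsc] at h
              cases h
              by_cases hc0 : c = 0
              · subst hc0
                have hsc0 : p1 = ptr + 2 ∧ k = 0 := by
                  cases f with
                  | zero => rw [shapeK] at hsc; simp at hsc
                  | succ f' => rw [shapeK] at hsc; simp at hsc; exact ⟨hsc.1.symm, hsc.2.symm⟩
                obtain ⟨rfl, rfl⟩ := hsc0
                have h0 : aChildrenI inputs G 0 (ptr + 2) 0 [] =
                    some (0, [], ptr + 2, G) := by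
                  rw [aChildrenI.eq_def]; simp
                obtain ⟨X, Y, hfin⟩ := aFinish_sound inputs m 0 [] (ptr + 2) (Or.inl rfl)
                refine ⟨X, Y, ?_⟩
                simp only [Nat.zero_add, h0, hfin]
              · obtain ⟨mt1, cvs1, hch⟩ := ih.2 _ _ _ _ hsc G 0 []
                simp only [hch]
                obtain ⟨X, Y, hfin⟩ := aFinish_sound inputs m mt1 cvs1 p1
                  (Or.inr (by cases hcm.2 with | inl hx => exact absurd hx hc0 | inr hx => exact hx))
                rw [hfin]
                exact ⟨X, Y, rfl⟩
          · simp [hcm] at h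
    · intro c ptr p1 k h G mt cvs
      rw [shapeK] at h
      rw [aChildrenI.eq_def]
      by_cases hc : c = 0
      · simp only [if_pos hc] at h ⊢
        cases h
        exact ⟨mt, cvs, by simp⟩
      · simp only [if_neg hc] at h ⊢
        cases hn : shapeK inputs f true 0 ptr with
        | none => simp [hn] at h
        | some r0 =>
          obtain ⟨p, k1⟩ := r0
          simp only [hn] at h
          cases hsc : shapeK inputs f false (c - 1) p with
          | none => simp [hsc] at h
          | some r1 =>
            obtain ⟨p1', k2⟩ := r1
            simp only [hsc] at h
            cases h
            -- fuel is (k1 + k2 + 1) + G = (k1 + (k2 + G)) + 1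
            have hfuel : k1 + k2 + 1 + G = (k1 + (k2 + G)) + 1 := by omega
            rw [hfuel]
            obtain ⟨X, Y, hni⟩ := ih.1 _ _ _ hn (k2 + G)
            simp only [hni]
            have hmin : min (k2 + G) (k1 + (k2 + G)) = k2 + G := by omega
            rw [hmin]
            obtain ⟨mt1, cvs1, hch⟩ := ih.2 _ _ _ _ hsc G (mt + X) (cvs ++ [Y])
            exact ⟨mt1, cvs1, hch⟩

theorem sim (inputs : List Int) : ∀ fuel : Nat, ∀ c ptr mt cvs mt1 cvs1 p1 fl,
    aChildrenI inputs fuel c ptr mt cvs = some (mt1, cvs1, p1, fl) →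
    ∀ m stack, bRun inputs fuel stack (c, m, mt, cvs) ptr =
      bPop inputs fl stack (bFinish inputs m mt1 cvs1 p1) := by
  intro fuel
  induction fuel using Nat.strong_induction_on with
  | _ fuel ih =>
    intro c ptr mt cvs mt1 cvs1 p1 fl h m stack
    rw [aChildrenI.eq_def] at h
    rw [bRun.eq_def]
    by_cases hc : c = 0
    · simp only [if_pos hc] at h
      cases h
      simp only [hc, ne_eq, not_true_eq_false, if_false]
      cases hf : bFinish inputs m mt cvs ptr with
      | none => simp [bPop]
      | some r =>
        obtain ⟨MT, V, P⟩ := r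
        cases stack with
        | nil => simp [bPop]
        | cons fr rest => simp [bPop]
    · simp only [if_neg hc] at h
      simp only [ne_eq, hc, not_false_eq_true, if_true]
      cases fuel with
      | zero => exact absurd h (by simp)
      | succ g =>
        cases hn : aNodeI inputs g ptr with
        | none => simp [hn] at h
        | some r0 =>
          obtain ⟨x, y, p, f1⟩ := r0
          simp only [hn] at h
          rw [aNodeI.eq_def] at hn
          cases hg1 : PySem.List.pyGet? inputs ptr with
          | none => simp [hg1] at hn
          | some c' =>
            cases hg2 : PySem.List.pyGet? inputs (ptr + 1) with
            | none => simp [hg1, hg2] at hn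
            | some m' =>
              simp only [hg1, hg2] at hn ⊢
              cases hch : aChildrenI inputs g c' (ptr + 2) 0 [] with
              | none => simp [hch] at hn
              | some s0 =>
                obtain ⟨mtc, cvsc, pc, f2⟩ := s0
                simp only [hch] at hn
                cases hf : aFinish inputs m' mtc cvsc pc with
                | none => simp [hf] at hn
                | some rr =>
                  obtain ⟨X, Y, P⟩ := rr
                  simp only [hf] at hn
                  cases hn
                  -- child step: IH on the child's children list
                  have step1 := ih g (by omega) _ _ _ _ _ _ _ _ hch m' ((c - 1, m, mt, cvs) :: stack)
                  rw [step1, bFinish_eq_aFinish, hf]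
                  simp only [bPop]
                  -- leftover fuel of the child bounds min
                  have hle := (leftover_le inputs g).2 _ _ _ _ _ hch
                  simp only [] at hle
                  rw [Nat.min_eq_left hle] at h
                  -- remaining siblings: IH again
                  exact ih _ (by omega) _ _ _ _ _ _ _ _ h m stack

-- ===== VERDICT (by name: the statement is the Claim_ definition above) =====
theorem runsolution_spec : Claim_equal_runsolution := by
  intro inputs ptr _ hpre
  unfold Spec_runsolution
  unfold Pre_runsolution at hpre
  cases hs : shapeK inputs (2 * inputs.length + 2) true 0 ptr with
  | none => rw [hs] at hpre; simp at hpre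
  | some r0 =>
    obtain ⟨q, k⟩ := r0
    rw [hs] at hpre
    simp only [decide_eq_true_eq] at hpre
    obtain ⟨X, Y, hni⟩ := (shapeK_sound inputs _).1 _ _ _ hs (inputs.length + 1 - k)
    rw [show k + (inputs.length + 1 - k) = inputs.length + 1 by omega] at hni
    have hnp := (inst_sound inputs _).1 _ _ _ _ _ hni
    rw [runsolution, hnp]
    rw [aNodeI.eq_def] at hni
    cases hg1 : PySem.List.pyGet? inputs ptr with
    | none => simp [hg1] at hni
    | some c =>
      cases hg2 : PySem.List.pyGet? inputs (ptr + 1) with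
      | none => simp [hg1, hg2] at hni
      | some m =>
        simp only [hg1, hg2] at hni
        cases hch : aChildrenI inputs (inputs.length + 1) c (ptr + 2) 0 [] with
        | none => simp [hch] at hni
        | some s0 =>
          obtain ⟨mt1, cvs1, p1, f2⟩ := s0
          simp only [hch] at hni
          cases hf : aFinish inputs m mt1 cvs1 p1 with
          | none => simp [hf] at hni
          | some rr =>
            simp only [hf] at hni
            cases hni
            simp only [runsolution_alt, hg1, hg2]
            rw [sim inputs _ _ _ _ _ _ _ _ _ hch m []]
            rw [bFinish_eq_aFinish, hf]
            simp [bPop]
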